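-- pv_equiv track=rewrite | github.com/LPL2211/PA | word-ladders/word-ladders/word_ladders_code_judge.py | arc_possible
-- ===== SOURCE A (Python) =====
-- from collections import Counter, defaultdict
--
-- def arc_possible(word_1, word_2):
--     """
--     Checks if arc is possible b/w word_1 and word_2.
--     """
--     res = True
--     last_four_chars_freq = dict(Counter(word_1[-4:]))
--     word_2_freq = dict(Counter(word_2))
--
--     for char, char_freq in last_four_chars_freq.items():
--         if char not in word_2_freq:
--             res = False
--             break
--         else:
--             if word_2_freq[char] < char_freq:
--                 res = False
--                 break
--
--     return res
-- ===== SOURCE B (Python) =====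
-- def arc_possible(word_1, word_2):
--     """
--     Checks if arc is possible b/w word_1 and word_2.
--     """
--     s = sorted(word_1[-4:])
--     t = sorted(word_2)
--     i = j = 0
--     while i < len(s) and j < len(t):
--         if t[j] < s[i]:
--             j += 1
--         elif t[j] == s[i]:
--             i += 1
--             j += 1
--         else:
--             return False
--     return i == len(s)
-- ===== Notes on version B (the rewrite author's own statement) =====
-- stated objective: alternative
-- what changed: B replaces A's two Counter/dict frequency tables and key-lookup loop with a sort-and-merge algorithm: it sorts the trailing 4-char slice and word_2 and runs one two-pointer merge pass that checks the sorted slice is a subsequence of sorted word_2 (multiset inclusion), building no frequency index at all.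
import Mathlib
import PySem

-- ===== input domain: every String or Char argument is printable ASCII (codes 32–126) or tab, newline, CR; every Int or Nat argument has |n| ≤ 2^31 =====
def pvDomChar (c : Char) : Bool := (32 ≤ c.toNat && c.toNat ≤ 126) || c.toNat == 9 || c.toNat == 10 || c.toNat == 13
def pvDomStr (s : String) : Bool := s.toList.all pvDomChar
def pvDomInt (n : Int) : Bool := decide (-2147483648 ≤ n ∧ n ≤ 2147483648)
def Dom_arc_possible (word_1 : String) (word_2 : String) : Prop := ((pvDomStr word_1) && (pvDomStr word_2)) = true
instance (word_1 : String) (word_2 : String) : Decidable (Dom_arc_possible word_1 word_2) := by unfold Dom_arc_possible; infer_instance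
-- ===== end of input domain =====

-- B replaces A's two frequency dictionaries with a sort-and-merge scan: sort the trailing
-- slice and word_2 and check subsequence containment in one merge pass (objective: alternative).

-- ===== PORT A =====
-- the for-loop over last_four_chars_freq.items() with its break, returning res
def arcLoopA (wf : PySem.Dict Char Int) : List (Char × Int) → Bool
  | [] => true
  | (c, f) :: rest =>
    if wf.contains c = false then false
    else if wf.getD c 0 < f then false
    else arcLoopA wf rest

def arc_possible (word_1 : String) (word_2 : String) : Bool :=
  let last_four_chars_freq := PySem.Dict.counter (PySem.Str.slice word_1 (some (-4)) none).toList
  let word_2_freq := PySem.Dict.counter word_2.toList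
  arcLoopA word_2_freq last_four_chars_freq.items

-- ===== PORT B =====
-- the while-loop over the two sorted lists: pointer advance = consuming the list heads
def mergeSub : List Char → List Char → Bool
  | [], _ => true
  | _ :: _, [] => false
  | c :: s', d :: t' =>
    if d < c then mergeSub (c :: s') t'
    else if d = c then mergeSub s' t'
    else false
termination_by s t => s.length + t.length
decreasing_by all_goals (simp only [List.length_cons]; omega)

def arc_possible_alt (word_1 : String) (word_2 : String) : Bool :=
  let s := PySem.List.sorted (PySem.Str.slice word_1 (some (-4)) none).toList id
  let t := PySem.List.sorted word_2.toList id
  mergeSub s t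

-- ===== PRECONDITION & SPEC =====
def Spec_arc_possible (word_1 : String) (word_2 : String) (out : Bool) : Prop := out = arc_possible_alt word_1 word_2
instance (word_1 : String) (word_2 : String) (out : Bool) : Decidable (Spec_arc_possible word_1 word_2 out) := by unfold Spec_arc_possible; infer_instance

-- ===== CLAIM (what is proved, stated in full; the proofs are below) =====
def Claim_equal_arc_possible : Prop := ∀ (word_1 : String) (word_2 : String), Dom_arc_possible word_1 word_2 → Spec_arc_possible word_1 word_2 (arc_possible word_1 word_2)

-- ===== LEMMAS AND PROOFS =====

-- A's loop over the counter items is the pointwise count comparison over the distinct keys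
lemma arcLoopA_true_iff (w2l s l : List Char) (h : ∀ c ∈ l, c ∈ s) :
    (arcLoopA (PySem.Dict.counter w2l) (l.map (fun k => (k, (s.count k : Int)))) = true) ↔
      ∀ c ∈ l, s.count c ≤ w2l.count c := by
  induction l with
  | nil => simp [arcLoopA]
  | cons c rest ih =>
    have hc : c ∈ s := h c (List.mem_cons_self ..)
    simp only [List.map, arcLoopA,
      PySem.Dict.contains_counter, PySem.Dict.getD_counter]
    by_cases hmem : c ∈ w2l
    · have hcon : w2l.contains c = true := by simpa using hmem
      by_cases hlt : w2l.count c < s.count c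
      · have hilt : ((w2l.count c : Int) < (s.count c : Int)) := by exact_mod_cast hlt
        rw [if_neg (by simpa using hmem), if_pos hilt]
        exact iff_of_false (by simp)
          (fun hall => absurd (hall c (List.mem_cons_self ..)) (by omega))
      · have hilt : ¬ ((w2l.count c : Int) < (s.count c : Int)) := by exact_mod_cast hlt
        rw [if_neg (by simpa using hmem), if_neg hilt]
        rw [ih (fun x hx => h x (List.mem_cons_of_mem _ hx))]
        constructor
        · intro hall x hx
          rcases List.mem_cons.mp hx with rfl | hx'
          · omega
          · exact hall x hx'
        · intro hall x hx
          exact hall x (List.mem_cons_of_mem _ hx)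
    · have hcon : w2l.contains c = false := by simpa using hmem
      have h0 : List.count c w2l = 0 := List.count_eq_zero.mpr hmem
      have hpos : 0 < List.count c s := List.count_pos_iff.mpr hc
      rw [if_pos hcon]
      exact iff_of_false (by simp)
        (fun hall => absurd (hall c (List.mem_cons_self ..)) (by omega))

lemma arc_possible_true_iff (word_1 word_2 : String) :
    arc_possible word_1 word_2 = true ↔
      List.Subperm (PySem.Str.slice word_1 (some (-4)) none).toList word_2.toList := by
  unfold arc_possible
  dsimp only
  rw [PySem.Dict.items_counter]
  rw [arcLoopA_true_iff _ _ _ (fun c hc => (PySem.Set.mem_ofList _ _).mp hc)]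
  rw [List.subperm_ext_iff]
  constructor
  · intro hall c hc
    exact hall c ((PySem.Set.mem_ofList _ _).mpr hc)
  · intro hall c hc
    exact hall c ((PySem.Set.mem_ofList _ _).mp hc)

-- on sorted lists, the merge scan decides subsequence containment
lemma mergeSub_iff (t s : List Char) (hs : List.Pairwise (· ≤ ·) s)
    (ht : List.Pairwise (· ≤ ·) t) : (mergeSub s t = true) ↔ List.Sublist s t := by
  induction t generalizing s with
  | nil =>
    cases s with
    | nil => simp [mergeSub]
    | cons c s' => simp [mergeSub]
  | cons d t' ih =>
    cases s with
    | nil => simp [mergeSub]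
    | cons c s' =>
      rw [List.pairwise_cons] at ht
      by_cases hlt : d < c
      · rw [show mergeSub (c :: s') (d :: t') = mergeSub (c :: s') t' from by
          simp [mergeSub, hlt]]
        rw [ih (c :: s') hs ht.2]
        constructor
        · exact fun hsub => hsub.cons d
        · intro hsub
          rcases List.sublist_cons_iff.mp hsub with h' | ⟨r, hr, _⟩
          · exact h'
          · obtain ⟨h1, -⟩ := List.cons_eq_cons.mp hr
            exact absurd h1 (ne_of_gt hlt)
      · by_cases heq : d = c
        · subst heq
          rw [List.pairwise_cons] at hs
          rw [show mergeSub (d :: s') (d :: t') = mergeSub s' t' from by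
            simp [mergeSub]]
          rw [ih s' hs.2 ht.2, List.cons_sublist_cons]
        · have hgt : c < d := lt_of_le_of_ne (le_of_not_gt hlt) (fun h => heq h.symm)
          rw [show mergeSub (c :: s') (d :: t') = false from by simp [mergeSub, hlt, heq]]
          simp only [Bool.false_eq_true, false_iff]
          intro hsub
          have hcmem : c ∈ d :: t' := hsub.subset (List.mem_cons_self ..)
          rcases List.mem_cons.mp hcmem with rfl | hmem
          · exact lt_irrefl c hgt
          · exact absurd (ht.1 c hmem) (not_le_of_gt hgt)

lemma arc_possible_alt_true_iff (word_1 word_2 : String) :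
    arc_possible_alt word_1 word_2 = true ↔
      List.Subperm (PySem.Str.slice word_1 (some (-4)) none).toList word_2.toList := by
  unfold arc_possible_alt
  have hp1 : List.Pairwise (· ≤ ·)
      (PySem.List.sorted (PySem.Str.slice word_1 (some (-4)) none).toList id) := by
    simpa using PySem.List.sorted_pairwise (PySem.Str.slice word_1 (some (-4)) none).toList id
  have hp2 : List.Pairwise (· ≤ ·) (PySem.List.sorted word_2.toList id) := by
    simpa using PySem.List.sorted_pairwise word_2.toList id
  rw [mergeSub_iff _ _ hp1 hp2]
  have p1 := PySem.List.sorted_perm (PySem.Str.slice word_1 (some (-4)) none).toList id false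
  have p2 := PySem.List.sorted_perm word_2.toList id false
  haveI : Std.Antisymm ((· ≤ ·) : Char → Char → Prop) := ⟨fun _ _ h1 h2 => le_antisymm h1 h2⟩
  constructor
  · intro hsub
    exact p2.subperm_left.mp (p1.subperm_right.mp hsub.subperm)
  · intro hsub
    exact List.sublist_of_subperm_of_pairwise
      (p2.subperm_left.mpr (p1.subperm_right.mpr hsub)) hp1 hp2

-- ===== VERDICT (by name: the statement is the Claim_ definition above) =====
theorem arc_possible_spec : Claim_equal_arc_possible := by
  intro word_1 word_2 _
  unfold Spec_arc_possible
  rw [Bool.eq_iff_iff, arc_possible_true_iff, arc_possible_alt_true_iff]
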